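-- pv_equiv track=rewrite | github.com/graham218/Leet-code.2025---Bill.Graham.Peacemaker- | Python/3-SlidingWindow/Algorithms/1-FixedWindow/FixedWindowPro.py | longest_active_session
-- ===== SOURCE A (Python) =====
-- def longest_active_session(logins, k):
--     """
--     Finds the longest session (window of size k) with the highest number of active users.
--     Assumes active users are those with login counts greater than 10.
--
--     Args:
--         logins (list): A list of login counts for each user.
--         k (int): The size of the sliding window.
--
--     Returns:
--         int: The maximum number of active users in any window of size k.
--     """
--     active_count = sum(1 for x in logins[:k] if x > 10)  # Count active users in the first window.
--     max_active = active_count  # Initialize max_active.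
--
--     for i in range(k, len(logins)):
--         # Slide the window: adjust active_count based on users entering and leaving.
--         if logins[i] > 10:
--             active_count += 1
--         if logins[i - k] > 10:
--             active_count -= 1
--         max_active = max(max_active, active_count)  # Update max_active.
--     return max_active
-- ===== SOURCE B (Python) =====
-- def longest_active_session(logins, k):
--     n = len(logins)
--     pref = [0]
--     s = 0
--     for x in logins:
--         if x > 10:
--             s += 1
--         pref.append(s)
--     best = pref[min(k, n)]
--     for i in range(k, n):
--         best = max(best, pref[i + 1] - pref[i - k + 1])
--     return best
-- ===== Notes on version B (the rewrite author's own statement) =====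
-- stated objective: alternative
-- what changed: Replaces A's incremental sliding counter (add entering, subtract leaving element) with a precomputed prefix-sum table of active flags, each window count obtained as a difference of two table entries.
import Mathlib
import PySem

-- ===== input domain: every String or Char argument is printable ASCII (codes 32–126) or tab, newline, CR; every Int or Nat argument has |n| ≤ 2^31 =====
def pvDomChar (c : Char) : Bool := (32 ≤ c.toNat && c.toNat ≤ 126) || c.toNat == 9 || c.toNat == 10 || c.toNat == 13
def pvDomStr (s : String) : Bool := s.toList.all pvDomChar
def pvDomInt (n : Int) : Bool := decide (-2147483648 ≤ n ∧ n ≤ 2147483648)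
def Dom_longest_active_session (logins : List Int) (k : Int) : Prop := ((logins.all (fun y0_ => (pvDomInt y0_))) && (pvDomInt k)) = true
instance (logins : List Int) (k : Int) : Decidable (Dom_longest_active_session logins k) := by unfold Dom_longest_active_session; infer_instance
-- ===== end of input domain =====

-- B replaces A's incremental sliding counter with a prefix-sum table queried by differences; objective: alternative (same cost, different structure).

-- ===== PORT A =====
def longest_active_session (logins : List Int) (k : Int) : Int :=
  -- active_count = sum(1 for x in logins[:k] if x > 10)
  let active0 : Int :=
    ((PySem.List.slice logins none (some k)).filter (fun x => x > 10)).length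
  -- for i in range(k, len(logins)): …
  let st :=
    (PySem.List.pyRange k (logins.length : Int)).foldl
      (fun (st : Int × Int) i =>
        let ac1 := if PySem.List.pyGetD logins i 0 > 10 then st.1 + 1 else st.1
        let ac2 := if PySem.List.pyGetD logins (i - k) 0 > 10 then ac1 - 1 else ac1
        (ac2, max st.2 ac2))
      (active0, active0)
  st.2

-- ===== PORT B =====
def longest_active_session_alt (logins : List Int) (k : Int) : Int :=
  let n : Int := logins.length
  -- build prefix-sum table pref with running total s
  let ps :=
    logins.foldl
      (fun (p : List Int × Int) x =>
        let s := if x > 10 then p.2 + 1 else p.2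
        (p.1 ++ [s], s))
      ([0], 0)
  let best := PySem.List.pyGetD ps.1 (min k n) 0
  (PySem.List.pyRange k n).foldl
    (fun best i =>
      max best (PySem.List.pyGetD ps.1 (i + 1) 0 - PySem.List.pyGetD ps.1 (i - k + 1) 0))
    best

-- ===== PRECONDITION & SPEC =====
-- Pre_ excludes k < 0, where the Python A always raises IndexError (logins[i - k] runs past the end).
def Pre_longest_active_session (logins : List Int) (k : Int) : Prop := 0 ≤ k
instance (logins : List Int) (k : Int) : Decidable (Pre_longest_active_session logins k) := by unfold Pre_longest_active_session; infer_instance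

def pvWitness_longest_active_session : List Int × Int := ([12, 3, 15, 7], 2)

def Spec_longest_active_session (logins : List Int) (k : Int) (out : Int) : Prop := out = longest_active_session_alt logins k
instance (logins : List Int) (k : Int) (out : Int) : Decidable (Spec_longest_active_session logins k out) := by unfold Spec_longest_active_session; infer_instance

-- ===== CLAIM (what is proved, stated in full; the proofs are below) =====
def Claim_equal_longest_active_session : Prop := ∀ (logins : List Int) (k : Int), Dom_longest_active_session logins k → Pre_longest_active_session logins k → Spec_longest_active_session logins k (longest_active_session logins k)

-- ===== LEMMAS AND PROOFS =====

-- number of active users among the first j entries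
def pvCnt (logins : List Int) (j : Nat) : Int :=
  ((logins.take j).countP (fun x => x > 10) : Nat)

lemma pvCnt_zero (logins : List Int) : pvCnt logins 0 = 0 := rfl

lemma pvCnt_succ (logins : List Int) (j : Nat) (h : j < logins.length) :
    pvCnt logins (j + 1) = pvCnt logins j + (if logins.getD j 0 > 10 then 1 else 0) := by
  have hx : logins[j]? = some logins[j] := List.getElem?_eq_getElem h
  unfold pvCnt
  rw [List.take_add_one, List.countP_append, hx]
  simp [List.getD, hx, List.countP_cons]

lemma pvCnt_clamp (logins : List Int) (j : Nat) (h : logins.length ≤ j) :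
    pvCnt logins j = pvCnt logins logins.length := by
  simp [pvCnt, List.take_of_length_le h, List.take_of_length_le (le_refl logins.length)]

lemma pvCnt_cons (x : Int) (xs : List Int) (j : Nat) :
    pvCnt (x :: xs) (j + 1) = (if x > 10 then 1 else 0) + pvCnt xs j := by
  simp only [pvCnt, List.take_succ_cons, List.countP_cons]
  split_ifs with h1 h2 <;> simp_all <;> omega

lemma pref_fold (xs : List Int) : ∀ (acc : List Int) (s : Int),
    xs.foldl
      (fun (p : List Int × Int) x =>
        let s := if x > 10 then p.2 + 1 else p.2
        (p.1 ++ [s], s))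
      (acc, s)
    = (acc ++ (List.range xs.length).map (fun j => s + pvCnt xs (j + 1)),
       s + pvCnt xs xs.length) := by
  induction xs with
  | nil => intro acc s; simp [pvCnt]
  | cons x xs ih =>
    intro acc s
    have hs' : (if x > 10 then s + 1 else s) = s + (if x > 10 then 1 else 0) := by
      split_ifs <;> ring
    simp only [List.foldl_cons, ih, List.length_cons, List.range_succ_eq_map,
      List.map_cons, List.map_map, Prod.mk.injEq]
    refine ⟨?_, ?_⟩
    · rw [List.append_assoc, List.singleton_append]
      congr 1
      congr 1
      · rw [pvCnt_cons, pvCnt_zero, hs']; ring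
      · refine List.map_congr_left ?_
        intro j _
        simp only [Function.comp, pvCnt_cons, hs']
        ring
    · rw [pvCnt_cons, hs']; ring
  
lemma pref_eq (logins : List Int) :
    (logins.foldl
      (fun (p : List Int × Int) x =>
        let s := if x > 10 then p.2 + 1 else p.2
        (p.1 ++ [s], s))
      ([0], 0)).1
    = (List.range (logins.length + 1)).map (fun j => pvCnt logins j) := by
  rw [pref_fold]
  simp [List.range_succ_eq_map, List.map_map, Function.comp, pvCnt_zero]

lemma getPref (logins : List Int) (j : Nat) (h : j ≤ logins.length) :
    PySem.List.pyGetD ((List.range (logins.length + 1)).map (fun j => pvCnt logins j)) (j : Int) 0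
      = pvCnt logins j := by
  rw [PySem.List.pyGetD_natCast, PySem.List.getD_map_range _ _ _ _ (by omega)]

lemma loop_eq (logins : List Int) (k : Int) (hk : 0 ≤ k) :
    ∀ (c i0 : Nat) (ma : Int), k ≤ (i0 : Int) → i0 + c = logins.length →
    ((PySem.List.pyRange (i0 : Int) (logins.length : Int)).foldl
        (fun (st : Int × Int) i =>
          let ac1 := if PySem.List.pyGetD logins i 0 > 10 then st.1 + 1 else st.1
          let ac2 := if PySem.List.pyGetD logins (i - k) 0 > 10 then ac1 - 1 else ac1
          (ac2, max st.2 ac2))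
        (pvCnt logins i0 - pvCnt logins (i0 - k.toNat), ma)).2
    = (PySem.List.pyRange (i0 : Int) (logins.length : Int)).foldl
        (fun best i =>
          max best
            (PySem.List.pyGetD ((List.range (logins.length + 1)).map (fun j => pvCnt logins j)) (i + 1) 0
              - PySem.List.pyGetD ((List.range (logins.length + 1)).map (fun j => pvCnt logins j)) (i - k + 1) 0))
        ma := by
  intro c
  induction c with
  | zero =>
    intro i0 ma h1 h2
    rw [PySem.List.pyRange_one_eq_nil (by omega : (logins.length : Int) ≤ (i0 : Int))]
    simp
  | succ c ih =>
    intro i0 ma h1 h2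
    have hlt : (i0 : Int) < (logins.length : Int) := by omega
    have hi0n : i0 < logins.length := by omega
    have hjn : i0 - k.toNat < logins.length := by omega
    rw [PySem.List.pyRange_one_cons hlt]
    simp only [List.foldl_cons]
    have hsub : (i0 : Int) - k = ((i0 - k.toNat : Nat) : Int) := by omega
    have hg1 : PySem.List.pyGetD logins (i0 : Int) 0 = logins.getD i0 0 :=
      PySem.List.pyGetD_natCast logins i0 0
    have hg2 : PySem.List.pyGetD logins ((i0 : Int) - k) 0 = logins.getD (i0 - k.toNat) 0 := by
      rw [hsub, PySem.List.pyGetD_natCast]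
    have hp1 : PySem.List.pyGetD ((List.range (logins.length + 1)).map (fun j => pvCnt logins j)) ((i0 : Int) + 1) 0
        = pvCnt logins (i0 + 1) := by
      have : (i0 : Int) + 1 = ((i0 + 1 : Nat) : Int) := by omega
      rw [this, getPref _ _ (by omega)]
    have hp2 : PySem.List.pyGetD ((List.range (logins.length + 1)).map (fun j => pvCnt logins j)) ((i0 : Int) - k + 1) 0
        = pvCnt logins (i0 - k.toNat + 1) := by
      have : (i0 : Int) - k + 1 = ((i0 - k.toNat + 1 : Nat) : Int) := by omega
      rw [this, getPref _ _ (by omega)]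
    have hac : (let ac1 := if PySem.List.pyGetD logins (i0 : Int) 0 > 10 then
                    (pvCnt logins i0 - pvCnt logins (i0 - k.toNat)) + 1
                  else pvCnt logins i0 - pvCnt logins (i0 - k.toNat)
                let ac2 := if PySem.List.pyGetD logins ((i0 : Int) - k) 0 > 10 then ac1 - 1 else ac1
                ac2)
        = pvCnt logins (i0 + 1) - pvCnt logins (i0 - k.toNat + 1) := by
      rw [hg1, hg2, pvCnt_succ _ _ hi0n, pvCnt_succ _ _ hjn]
      simp only
      split_ifs <;> ring
    simp only at hac
    rw [hp1, hp2]
    have hnext : ((i0 : Int) + 1) = ((i0 + 1 : Nat) : Int) := by omega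
    have hstep := ih (i0 + 1) (max ma (pvCnt logins (i0 + 1) - pvCnt logins (i0 - k.toNat + 1)))
      (by omega) (by omega)
    have hsub2 : i0 + 1 - k.toNat = i0 - k.toNat + 1 := by omega
    rw [hsub2] at hstep
    rw [hnext]
    rw [← hstep]
    congr 1
    rw [hac]

theorem longest_active_session_spec : Claim_equal_longest_active_session := by
  intro logins k _ hpre
  unfold Pre_longest_active_session at hpre
  unfold Spec_longest_active_session longest_active_session longest_active_session_alt
  have hk' : ((k.toNat : Nat) : Int) = k := by omega
  have hcount : (((PySem.List.slice logins none (some k)).filter (fun x => x > 10)).length : Int)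
      = pvCnt logins k.toNat := by
    rw [PySem.List.slice_to logins hpre]
    simp [pvCnt, List.countP_eq_length_filter]
  have hbest : PySem.List.pyGetD
        ((List.range (logins.length + 1)).map (fun j => pvCnt logins j)) (min k (logins.length : Int)) 0
      = pvCnt logins k.toNat := by
    rcases le_or_gt k (logins.length : Int) with h | h
    · rw [min_eq_left h, ← hk', getPref _ _ (by omega), Int.toNat_natCast]
    · rw [min_eq_right (le_of_lt h), getPref _ _ (le_refl _),
        pvCnt_clamp logins k.toNat (by omega)]
  simp only [pref_eq, hcount, hbest]
  rcases le_or_gt (logins.length : Int) k with h | h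
  · rw [PySem.List.pyRange_one_eq_nil h]
    simp
  · rw [← hk']
    have hloop := loop_eq logins ((k.toNat : Nat) : Int) (by omega) (logins.length - k.toNat)
      k.toNat (pvCnt logins k.toNat) (by omega) (by omega)
    simp only [Int.toNat_natCast, Nat.sub_self, pvCnt_zero, sub_zero] at hloop
    exact hloop
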